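-- pv_equiv track=rewrite | github.com/jiwon199/Algorithms-Study | 구현/뉴스 클러스터링.py | makeSet
-- ===== SOURCE A (Python) =====
-- from string import ascii_lowercase
--
-- def makeSet(strs):
--     arr=[]
--     alpha = list(ascii_lowercase)
--     for i in range(len(strs)-1):
--         temp=strs[i]+strs[i+1]
--         if strs[i] in alpha and strs[i+1] in alpha:
--             arr.append(temp)
--     return arr
-- ===== SOURCE B (Python) =====
-- from string import ascii_lowercase
--
-- def _emit(run):
--     # adjacent bigrams of one maximal lowercase run
--     return [a + b for a, b in zip(run, run[1:])]
--
-- def makeSet(strs):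
--     out = []
--     run = []
--     for c in strs:
--         if c in ascii_lowercase:
--             run.append(c)
--         else:
--             out.extend(_emit(run))
--             run = []
--     out.extend(_emit(run))
--     return out
-- ===== Notes on version B (the rewrite author's own statement) =====
-- stated objective: alternative
-- what changed: B replaces A's indexed pairwise scan (strs[i], strs[i+1] with a 26-element list membership test at every i) with a single left-to-right pass that accumulates maximal lowercase runs and emits each run's adjacent bigrams via zip when the run ends.
import Mathlib
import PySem

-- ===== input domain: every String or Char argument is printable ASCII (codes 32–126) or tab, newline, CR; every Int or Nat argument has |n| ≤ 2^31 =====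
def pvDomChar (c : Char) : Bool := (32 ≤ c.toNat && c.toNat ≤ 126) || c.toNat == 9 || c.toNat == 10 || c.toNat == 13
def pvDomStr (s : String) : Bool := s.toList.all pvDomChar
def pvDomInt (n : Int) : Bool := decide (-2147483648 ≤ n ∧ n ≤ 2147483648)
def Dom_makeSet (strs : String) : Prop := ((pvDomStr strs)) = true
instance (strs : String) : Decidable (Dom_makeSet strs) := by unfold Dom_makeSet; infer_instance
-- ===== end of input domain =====

-- B groups the string into maximal lowercase runs in one pass and emits each run's
-- adjacent bigrams, instead of A's flat indexed pairwise scan (objective: alternative).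

-- ascii_lowercase as a list of chars (= A's `alpha = list(ascii_lowercase)`; B tests `c in ascii_lowercase`)
def pvLower : List Char := "abcdefghijklmnopqrstuvwxyz".toList

-- ===== PORT A =====
-- for i in range(len(strs)-1): temp = strs[i]+strs[i+1]; if both in alpha: arr.append(temp)
-- (indices produced by the range are always in bounds, so pyGetD's default is never used)
def makeSet (strs : String) : List String :=
  (PySem.List.pyRange 0 ((strs.toList.length : Int) - 1) 1).foldl
    (fun arr i =>
      let c1 := PySem.List.pyGetD strs.toList i ' '
      let c2 := PySem.List.pyGetD strs.toList (i + 1) ' '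
      let temp := String.ofList [c1, c2]
      if pvLower.contains c1 && pvLower.contains c2 then arr ++ [temp] else arr)
    []

-- ===== PORT B =====
-- _emit(run) = [a+b for a, b in zip(run, run[1:])]
def emitRun (run : List Char) : List String :=
  (run.zip run.tail).map (fun ab => String.ofList [ab.1, ab.2])

-- one pass: grow the current lowercase run, flush its bigrams at each non-letter and at the end
def makeSet_alt (strs : String) : List String :=
  let st := strs.toList.foldl
    (fun (st : List String × List Char) c =>
      if pvLower.contains c then (st.1, st.2 ++ [c]) else (st.1 ++ emitRun st.2, []))
    ([], [])
  st.1 ++ emitRun st.2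

-- ===== PRECONDITION & SPEC =====
def Spec_makeSet (strs : String) (out : List String) : Prop := out = makeSet_alt strs
instance (strs : String) (out : List String) : Decidable (Spec_makeSet strs out) := by unfold Spec_makeSet; infer_instance

-- ===== CLAIM (what is proved, stated in full; the proofs are below) =====
def Claim_equal_makeSet : Prop := ∀ (strs : String), Dom_makeSet strs → Spec_makeSet strs (makeSet strs)

-- ===== LEMMAS AND PROOFS =====

-- common characterization: the lowercase adjacent bigrams, pairwise
def pairs : List Char → List String
  | a :: b :: t =>
      (if pvLower.contains a && pvLower.contains b then [String.ofList [a, b]] else []) ++ pairs (b :: t)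
  | _ => []

theorem emitRun_cons2 (a b : Char) (r : List Char) :
    emitRun (a :: b :: r) = String.ofList [a, b] :: emitRun (b :: r) := by
  simp [emitRun]

theorem pairs_all_low : ∀ (run : List Char),
    (∀ c ∈ run, c ∈ pvLower) → pairs run = emitRun run
  | [], _ => rfl
  | [_], _ => rfl
  | a :: b :: r, h => by
      have ha : a ∈ pvLower := h a (by simp)
      have hb : b ∈ pvLower := h b (by simp)
      rw [emitRun_cons2]
      simp only [pairs]
      rw [if_pos (by simp [ha, hb]),
          pairs_all_low (b :: r) (fun c hc => h c (List.mem_cons_of_mem _ hc))]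
      rfl

theorem pairs_break : ∀ (run : List Char) (c : Char) (t : List Char),
    (∀ x ∈ run, x ∈ pvLower) → c ∉ pvLower →
    pairs (run ++ c :: t) = emitRun run ++ pairs (c :: t)
  | [], c, t, _, _ => rfl
  | [a], c, t, _, hc => by
      show pairs (a :: c :: t) = emitRun [a] ++ pairs (c :: t)
      simp only [pairs]
      rw [if_neg (by simp [hc])]
      simp [emitRun]
  | a :: b :: r, c, t, h, hc => by
      have ha : a ∈ pvLower := h a (by simp)
      have hb : b ∈ pvLower := h b (by simp)
      rw [emitRun_cons2]
      show pairs (a :: b :: (r ++ c :: t)) = _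
      simp only [pairs]
      rw [if_pos (by simp [ha, hb]),
          show b :: (r ++ c :: t) = (b :: r) ++ c :: t from rfl,
          pairs_break (b :: r) c t (fun x hx => h x (List.mem_cons_of_mem _ hx)) hc]
      rfl

theorem pairs_cons_not_low (c : Char) (t : List Char) (hc : c ∉ pvLower) :
    pairs (c :: t) = pairs t := by
  cases t with
  | nil => rfl
  | cons d t' =>
      simp only [pairs]
      rw [if_neg (by simp [hc])]
      rfl

-- B's loop invariant: flushing the runs produces exactly the pairwise bigrams of run ++ l
theorem alt_inv : ∀ (l : List Char) (out : List String) (run : List Char),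
    (∀ c ∈ run, c ∈ pvLower) →
    (l.foldl
        (fun (st : List String × List Char) c =>
          if pvLower.contains c then (st.1, st.2 ++ [c]) else (st.1 ++ emitRun st.2, []))
        (out, run)).1
      ++ emitRun (l.foldl
        (fun (st : List String × List Char) c =>
          if pvLower.contains c then (st.1, st.2 ++ [c]) else (st.1 ++ emitRun st.2, []))
        (out, run)).2
    = out ++ pairs (run ++ l)
  | [], out, run, h => by
      simp [pairs_all_low run h]
  | c :: t, out, run, h => by
      by_cases hc : pvLower.contains c = true
      · rw [List.foldl_cons, if_pos hc,
            alt_inv t out (run ++ [c])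
              (by intro x hx
                  rcases List.mem_append.1 hx with h1 | h1
                  · exact h x h1
                  · simp at h1; subst h1; simpa using hc)]
        simp
      · have hcm : c ∉ pvLower := by simpa using hc
        rw [List.foldl_cons, if_neg hc,
            alt_inv t (out ++ emitRun run) [] (by simp)]
        rw [List.nil_append, pairs_break run c t h hcm, pairs_cons_not_low c t hcm]
        simp
  termination_by l => l.length

-- A's loop computes pairs, stated over Nat indices
theorem a_fold_pairs : ∀ (l : List Char) (acc : List String),
    (List.range (l.length - 1)).foldl
      (fun arr k =>
        let c1 := l.getD k ' '
        let c2 := l.getD (k + 1) ' '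
        let temp := String.ofList [c1, c2]
        if pvLower.contains c1 && pvLower.contains c2 then arr ++ [temp] else arr)
      acc = acc ++ pairs l
  | [], acc => by simp [pairs]
  | [a], acc => by simp [pairs]
  | a :: b :: t, acc => by
      have hlen : (a :: b :: t).length - 1 = t.length + 1 := by simp
      rw [hlen, List.range_succ_eq_map, List.foldl_cons, List.foldl_map]
      simp only [List.getD_cons_zero, List.getD_cons_succ]
      have IH := a_fold_pairs (b :: t)
        (if pvLower.contains a && pvLower.contains b then acc ++ [String.ofList [a, b]] else acc)
      simp only [List.getD_cons_succ] at IH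
      have hl2 : (b :: t).length - 1 = t.length := by simp
      rw [hl2] at IH
      rw [IH]
      simp only [pairs]
      split <;> simp

theorem makeSet_eq_pairs (strs : String) : makeSet strs = pairs strs.toList := by
  have key := a_fold_pairs strs.toList []
  unfold makeSet
  rw [PySem.List.pyRange_one]
  have h1 : (((strs.toList.length : Int) - 1) - 0).toNat = strs.toList.length - 1 := by omega
  rw [h1, List.foldl_map]
  refine Eq.trans ?_ key
  apply PySem.List.foldl_congr_mem
  intro arr k _
  have e1 : PySem.List.pyGetD strs.toList ((0 : Int) + (k : Nat)) ' ' = strs.toList.getD k ' ' := by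
    simp
  have e2 : PySem.List.pyGetD strs.toList ((0 : Int) + (k : Nat) + 1) ' ' = strs.toList.getD (k + 1) ' ' := by
    have h2 : ((0 : Int) + (k : Nat) + 1) = (((k + 1 : Nat)) : Int) := by push_cast; ring
    rw [h2, PySem.List.pyGetD_natCast]
  simp only [e1, e2]

theorem makeSet_alt_eq_pairs (strs : String) : makeSet_alt strs = pairs strs.toList := by
  have h := alt_inv strs.toList [] [] (by simp)
  simpa [makeSet_alt] using h

-- ===== VERDICT (by name: the statement is the Claim_ definition above) =====
theorem makeSet_spec : Claim_equal_makeSet := by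
  intro strs _
  unfold Spec_makeSet
  rw [makeSet_eq_pairs, makeSet_alt_eq_pairs]
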